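-- pv_equiv track=rewrite | github.com/nadeeshafdo/ByteMap | comp.py | segments_to_rgba_pixels
-- ===== SOURCE A (Python) =====
-- def segments_to_rgba_pixels(segments):
-- 	"""Group 4-bit segments into RGBA pixels (4 segments per pixel)."""
-- 	pixels = []
-- 	for i in range(0, len(segments), 4):
-- 		rgba = [0, 0, 0, 0]
-- 		for j in range(4):
-- 			if i + j < len(segments):
-- 				# Scale 4-bit value (0-15) to 8-bit (0-255)
-- 				rgba[j] = segments[i + j] * 17
-- 		pixels.append(tuple(rgba))
-- 	return pixels
-- ===== SOURCE B (Python) =====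
-- def segments_to_rgba_pixels(segments):
-- 	"""Group 4-bit segments into RGBA pixels (4 segments per pixel)."""
-- 	scaled = [s * 17 for s in segments]
-- 	scaled += [0] * (-len(scaled) % 4)
-- 	it = iter(scaled)
-- 	return list(zip(it, it, it, it))
-- ===== Notes on version B (the rewrite author's own statement) =====
-- stated objective: simpler
-- what changed: Replaced A's nested loop with per-element boundary checks by a two-phase pipeline: scale every segment by 17 in one flat pass, zero-pad the flat list to a multiple of 4, then group consecutive 4-tuples with an iterator zip.
import Mathlib
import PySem

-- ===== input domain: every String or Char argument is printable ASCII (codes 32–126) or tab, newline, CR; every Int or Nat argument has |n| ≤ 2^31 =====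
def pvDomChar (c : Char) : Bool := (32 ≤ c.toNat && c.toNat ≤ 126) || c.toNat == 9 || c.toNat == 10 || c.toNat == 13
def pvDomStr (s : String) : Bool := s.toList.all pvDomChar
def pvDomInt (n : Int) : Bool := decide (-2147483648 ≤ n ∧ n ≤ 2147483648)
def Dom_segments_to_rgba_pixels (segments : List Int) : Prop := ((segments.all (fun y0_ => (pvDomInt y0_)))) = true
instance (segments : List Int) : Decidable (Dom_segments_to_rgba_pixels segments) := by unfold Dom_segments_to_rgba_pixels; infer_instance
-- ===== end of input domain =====

-- B scales all segments in one pass, zero-pads the flat list to a multiple of 4, then groups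
-- consecutive 4-tuples — a simpler two-phase decomposition of A's nested loop (same output).

-- ===== PORT A =====
-- Literal port of A: outer loop over range(0, len, 4); inner loop j in range(4) mutating
-- rgba (ported as List.set; j is 0..3 so j.toNat is exact); segments[i+j] is only read under
-- the guard i+j < len with i+j ≥ 0, so pyGetD with default 0 is exact there.
def segments_to_rgba_pixels (segments : List Int) : List (Int × Int × Int × Int) :=
  (PySem.List.pyRange 0 (segments.length : Int) 4).foldl (fun pixels i =>
    let rgba : List Int :=
      (PySem.List.pyRange 0 4 1).foldl (fun rgba j =>
        if i + j < (segments.length : Int) then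
          rgba.set j.toNat (PySem.List.pyGetD segments (i + j) 0 * 17)
        else rgba) [0, 0, 0, 0]
    pixels ++ [(PySem.List.pyGetD rgba 0 0, PySem.List.pyGetD rgba 1 0,
                PySem.List.pyGetD rgba 2 0, PySem.List.pyGetD rgba 3 0)]) []

-- ===== PORT B =====
-- list(zip(it, it, it, it)) over a single iterator takes consecutive 4-tuples:
def pvChunk4 : List Int → List (Int × Int × Int × Int)
  | a :: b :: c :: d :: rest => (a, b, c, d) :: pvChunk4 rest
  | _ => []

def segments_to_rgba_pixels_alt (segments : List Int) : List (Int × Int × Int × Int) :=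
  let scaled := segments.map (· * 17)
  let padded := scaled ++ List.replicate (PySem.Int.mod (-(scaled.length : Int)) 4).toNat 0
  pvChunk4 padded

-- ===== PRECONDITION & SPEC =====
def Spec_segments_to_rgba_pixels (segments : List Int) (out : List (Int × Int × Int × Int)) : Prop := out = segments_to_rgba_pixels_alt segments
instance (segments : List Int) (out : List (Int × Int × Int × Int)) : Decidable (Spec_segments_to_rgba_pixels segments out) := by unfold Spec_segments_to_rgba_pixels; infer_instance

-- ===== CLAIM (what is proved, stated in full; the proofs are below) =====
def Claim_equal_segments_to_rgba_pixels : Prop := ∀ (segments : List Int), Dom_segments_to_rgba_pixels segments → Spec_segments_to_rgba_pixels segments (segments_to_rgba_pixels segments)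

-- ===== LEMMAS AND PROOFS =====

-- the scaled value A places at flat position m (0 beyond the end of the list)
def pvScale (l : List Int) (m : Nat) : Int := if m < l.length then l.getD m 0 * 17 else 0

-- A's pixel k is built from flat positions 4k .. 4k+3
lemma pvA_eq (segments : List Int) :
    segments_to_rgba_pixels segments =
      (List.range ((segments.length + 3) / 4)).map
        (fun k => (pvScale segments (4*k), pvScale segments (4*k+1),
                   pvScale segments (4*k+2), pvScale segments (4*k+3))) := by
  unfold segments_to_rgba_pixels
  rw [PySem.List.pyRange_of_pos _ _ (by norm_num : (0:Int) < 4), List.foldl_map,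
      PySem.List.foldl_append_singleton_eq_map]
  rw [show (if (0:Int) < (segments.length:Int) then (((segments.length:Int) - 0 + 4 - 1) / 4).toNat else 0) = (segments.length + 3) / 4 by
        rcases Nat.eq_zero_or_pos segments.length with h | h
        · simp [h]
        · rw [if_pos (by exact_mod_cast h)]; omega]
  rw [List.nil_append]
  apply List.map_congr_left
  intro k _
  simp only [show PySem.List.pyRange 0 4 1 = [0,1,2,3] from by decide, List.foldl]
  norm_num
  rw [show ((4:Int) * (k:Int)) = ((4*k : Nat) : Int) by push_cast; ring]
  rw [show ((4*k : Nat):Int) + 1 = ((4*k+1 : Nat) : Int) by push_cast; ring,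
      show ((4*k : Nat):Int) + 2 = ((4*k+2 : Nat) : Int) by push_cast; ring,
      show ((4*k : Nat):Int) + 3 = ((4*k+3 : Nat) : Int) by push_cast; ring]
  simp only [PySem.List.pyGetD_natCast, Nat.cast_lt, pvScale]
  split_ifs <;> simp_all [List.set, PySem.List.pyGetD_ofNat']

lemma pvMod_shift (n : Nat) :
    PySem.Int.mod (-(((n:Int)) + 4)) 4 = PySem.Int.mod (-(n:Int)) 4 := by
  rw [PySem.Int.mod_eq_emod_of_pos (by norm_num), PySem.Int.mod_eq_emod_of_pos (by norm_num)]
  omega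

-- B consumes four scaled values per output pixel
lemma pvB_cons4 (a b c d : Int) (rest : List Int) :
    segments_to_rgba_pixels_alt (a :: b :: c :: d :: rest) =
      (a*17, b*17, c*17, d*17) :: segments_to_rgba_pixels_alt rest := by
  simp only [segments_to_rgba_pixels_alt, List.map_cons, List.length_cons, List.length_map]
  rw [show ((rest.length + 1 + 1 + 1 + 1 : Nat) : Int) = (rest.length : Int) + 4 by push_cast; ring,
      pvMod_shift]
  simp [pvChunk4]

-- dropping a whole pixel's worth of input shifts pvScale by 4
lemma pvScale_cons4 (a b c d : Int) (rest : List Int) (m : Nat) :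
    pvScale (a :: b :: c :: d :: rest) (m + 4) = pvScale rest m := by
  have hidx : (a :: b :: c :: d :: rest)[m+4]? = rest[m]? := by
    rw [show (a :: b :: c :: d :: rest) = [a,b,c,d] ++ rest from rfl,
        List.getElem?_append_right (by simp)]
    simp
  simp only [pvScale, List.getD_eq_getElem?_getD, hidx, List.length_cons]
  simp only [show (m + 4 < rest.length + 1 + 1 + 1 + 1) ↔ (m < rest.length) from by omega]

lemma pvKey : ∀ (segments : List Int),
    segments_to_rgba_pixels segments = segments_to_rgba_pixels_alt segments := by
  intro segments
  induction h : segments.length using Nat.strong_induction_on generalizing segments with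
  | _ n ih =>
    match segments with
    | [] => rfl
    | [a] =>
      rw [pvA_eq]
      simp [pvScale, segments_to_rgba_pixels_alt, pvChunk4]
    | [a, b] =>
      rw [pvA_eq]
      simp [pvScale, segments_to_rgba_pixels_alt, pvChunk4]
    | [a, b, c] =>
      rw [pvA_eq]
      simp [pvScale, segments_to_rgba_pixels_alt, pvChunk4]
    | a :: b :: c :: d :: rest =>
      have hn : rest.length < n := by simp at h; omega
      rw [pvB_cons4, pvA_eq,
          show ((a :: b :: c :: d :: rest).length + 3) / 4 = (rest.length + 3) / 4 + 1 by
            simp; omega,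
          List.range_succ_eq_map, List.map_cons, List.map_map]
      refine congrArg₂ List.cons ?_ ?_
      · simp [pvScale, List.getD]
      · rw [← ih rest.length hn rest rfl, pvA_eq rest]
        apply List.map_congr_left
        intro k _
        simp only [Function.comp]
        rw [show 4 * Nat.succ k = 4*k + 4 by omega]
        rw [show 4*k + 4 + 1 = (4*k+1) + 4 by omega,
            show 4*k + 4 + 2 = (4*k+2) + 4 by omega,
            show 4*k + 4 + 3 = (4*k+3) + 4 by omega,
            pvScale_cons4, pvScale_cons4, pvScale_cons4, pvScale_cons4]

-- ===== VERDICT (by name: the statement is the Claim_ definition above) =====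
theorem segments_to_rgba_pixels_spec : Claim_equal_segments_to_rgba_pixels := by
  intro segments _
  unfold Spec_segments_to_rgba_pixels
  exact pvKey segments
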